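-- pv_equiv track=rewrite | github.com/samuelbagin1/sem1-python | cvicSkuska.py | sameNuly
-- ===== SOURCE A (Python) =====
-- def sameNuly(A):
--     pocNul=0
--     for p in range(len(A[0])):  #stlpec
--         bRiadok=True
--         for i in range(len(A)): #riadok
--             if A[i][p]!=0:
--                 bRiadok=False
--         if bRiadok==True:
--             pocNul+=1
--     return pocNul
-- ===== SOURCE B (Python) =====
-- def sameNuly(A):
--     cands = set(range(len(A[0])))
--     for row in A:
--         if not cands:
--             break
--         cands = {p for p in cands if row[p] == 0}
--     return len(cands)
-- ===== Notes on version B (the rewrite author's own statement) =====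
-- stated objective: alternative
-- what changed: Instead of scanning every cell column-major with a boolean flag, B maintains a shrinking set of surviving candidate columns, filtering it against each row (only surviving columns are ever re-inspected, with an early break once the set is empty) and returning its final size.
import Mathlib
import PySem

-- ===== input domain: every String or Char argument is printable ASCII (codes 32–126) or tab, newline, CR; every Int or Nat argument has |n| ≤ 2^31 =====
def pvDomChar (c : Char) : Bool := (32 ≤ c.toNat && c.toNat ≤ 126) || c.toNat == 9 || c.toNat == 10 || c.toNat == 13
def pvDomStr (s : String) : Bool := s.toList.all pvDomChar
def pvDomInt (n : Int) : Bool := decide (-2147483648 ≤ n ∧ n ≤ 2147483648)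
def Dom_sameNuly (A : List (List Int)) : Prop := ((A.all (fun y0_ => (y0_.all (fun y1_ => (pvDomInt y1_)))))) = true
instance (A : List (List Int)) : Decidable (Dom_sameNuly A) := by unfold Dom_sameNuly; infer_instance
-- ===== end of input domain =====

-- B replaces A's column-major flag scan by a shrinking set of surviving candidate
-- columns filtered row by row (with an early break when none survive): alternative algorithm.

-- ===== PORT A =====
def sameNuly (A : List (List Int)) : Int :=
  let m := (PySem.List.pyGetD A 0 []).length
  (PySem.List.pyRange 0 (m : Int) 1).foldl (fun pocNul p =>
    let bRiadok := (PySem.List.pyRange 0 (A.length : Int) 1).foldl (fun b i =>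
      if PySem.List.pyGetD (PySem.List.pyGetD A i []) p 0 ≠ 0 then false else b) true
    if bRiadok = true then pocNul + 1 else pocNul) 0

-- ===== PORT B =====
-- 'break' when the set is empty is ported as the loop body leaving an empty set
-- unchanged (behaviourally identical); the set comprehension is the foldl of
-- Set.add over the current candidates. len(cands) is order-independent, so the
-- Set-as-insertion-ordered-list model is exact here.
def sameNuly_alt (A : List (List Int)) : Int :=
  let cands0 : PySem.Set Int :=
    PySem.Set.ofList (PySem.List.pyRange 0 (((PySem.List.pyGetD A 0 []).length : Nat) : Int) 1)
  let cands := A.foldl (fun (c : PySem.Set Int) row =>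
    if c = [] then c
    else c.foldl (fun (s : PySem.Set Int) p =>
      if PySem.List.pyGetD row p 0 = 0 then PySem.Set.add s p else s) PySem.Set.empty) cands0
  (cands.length : Int)

-- ===== PRECONDITION & SPEC =====
-- Pre_ excludes exactly the inputs on which Python A raises IndexError: the empty
-- matrix (A[0]) and ragged matrices where some row is shorter than row 0.
def Pre_sameNuly (A : List (List Int)) : Prop :=
  A ≠ [] ∧ ∀ row ∈ A, (A.headD []).length ≤ row.length
instance (A : List (List Int)) : Decidable (Pre_sameNuly A) := by unfold Pre_sameNuly; infer_instance

def pvWitness_sameNuly : List (List Int) := [[0, 1], [0, 2]]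

def Spec_sameNuly (A : List (List Int)) (out : Int) : Prop := out = sameNuly_alt A
instance (A : List (List Int)) (out : Int) : Decidable (Spec_sameNuly A out) := by unfold Spec_sameNuly; infer_instance

-- ===== CLAIM (what is proved, stated in full; the proofs are below) =====
def Claim_equal_sameNuly : Prop := ∀ (A : List (List Int)), Dom_sameNuly A → Pre_sameNuly A → Spec_sameNuly A (sameNuly A)

-- ===== LEMMAS AND PROOFS =====

-- A's inner flag loop over a list of rows computes "init && all entries at p are zero".
theorem pv_flag_foldl (p : Int) (rows : List (List Int)) (b : Bool) :
    rows.foldl (fun b row => if PySem.List.pyGetD row p 0 ≠ 0 then false else b) b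
      = (b && rows.all (fun row => PySem.List.pyGetD row p 0 = 0)) := by
  induction rows generalizing b with
  | nil => simp
  | cons r rs ih =>
      simp only [List.foldl_cons, List.all_cons, ih]
      by_cases h : PySem.List.pyGetD r p 0 = 0 <;> simp [h]

-- B's set comprehension over a duplicate-free candidate list is a filter.
theorem pv_comprehension_filter (row : List Int) (c : List Int) (s : PySem.Set Int)
    (hc : c.Nodup) (hs : ∀ x ∈ c, x ∉ s) :
    c.foldl (fun (s : PySem.Set Int) p =>
        if PySem.List.pyGetD row p 0 = 0 then PySem.Set.add s p else s) s
      = s ++ c.filter (fun p => decide (PySem.List.pyGetD row p 0 = 0)) := by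
  induction c generalizing s with
  | nil => simp
  | cons x xs ih =>
      have hx : x ∉ s := hs x (List.mem_cons_self)
      have hxs : ∀ y ∈ xs, y ∉ s := fun y hy => hs y (List.mem_cons_of_mem _ hy)
      simp only [List.foldl_cons, List.filter_cons]
      by_cases h : PySem.List.pyGetD row x 0 = 0
      · rw [if_pos h, PySem.Set.add_of_not_mem hx,
          ih (s ++ [x]) (List.Nodup.of_cons hc) (by
            intro y hy
            simp only [List.mem_append, List.mem_singleton]
            rintro (h1 | rfl)
            · exact hxs y hy h1
            · exact (List.nodup_cons.mp hc).1 hy)]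
        simp [h]
      · rw [if_neg h, ih s (List.Nodup.of_cons hc) hxs]
        simp [h]

-- The break branch: an empty candidate set stays empty through the remaining rows.
theorem pv_break_nil (rows : List (List Int)) :
    rows.foldl (fun (c : PySem.Set Int) row =>
      if c = [] then c
      else c.foldl (fun (s : PySem.Set Int) p =>
        if PySem.List.pyGetD row p 0 = 0 then PySem.Set.add s p else s) PySem.Set.empty)
      ([] : PySem.Set Int) = [] := by
  induction rows with
  | nil => rfl
  | cons r rs ih => simpa using ih

-- Invariant of B's row loop: starting from L.filter g, the surviving candidates after
-- processing 'rows' are the members of L on which g holds and every row is zero.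
theorem pv_survivors (rows : List (List Int)) (L : List Int) (g : Int → Bool) (hL : L.Nodup) :
    rows.foldl (fun (c : PySem.Set Int) row =>
      if c = [] then c
      else c.foldl (fun (s : PySem.Set Int) p =>
        if PySem.List.pyGetD row p 0 = 0 then PySem.Set.add s p else s) PySem.Set.empty)
      (L.filter g)
      = L.filter (fun p => g p && rows.all (fun row => decide (PySem.List.pyGetD row p 0 = 0))) := by
  induction rows generalizing g with
  | nil => simp
  | cons r rs ih =>
      simp only [List.foldl_cons]
      by_cases hnil : L.filter g = []
      · rw [hnil, if_pos rfl, pv_break_nil]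
        have : L.filter (fun p => g p && (r :: rs).all (fun row => decide (PySem.List.pyGetD row p 0 = 0))) = [] := by
          rw [List.filter_eq_nil_iff] at hnil ⊢
          intro a ha hcontra
          exact hnil a ha (by simpa using (Bool.and_elim_left hcontra))
        rw [this]
      · rw [if_neg hnil,
          pv_comprehension_filter r (L.filter g) PySem.Set.empty (hL.filter g) (by simp [PySem.Set.empty]),
          show ∀ (l : List Int), (PySem.Set.empty : PySem.Set Int) ++ l = l from fun l => rfl,
          List.filter_filter,
          show List.filter (fun a => decide (PySem.List.pyGetD r a 0 = 0) && g a) L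
            = List.filter (fun p => g p && decide (PySem.List.pyGetD r p 0 = 0)) L from
            List.filter_congr (fun p _ => Bool.and_comm _ _),
          ih (fun p => g p && decide (PySem.List.pyGetD r p 0 = 0))]
        apply List.filter_congr
        intro p _
        simp only [List.all_cons]
        cases g p <;> cases hgr : decide (PySem.List.pyGetD r p 0 = 0) <;> simp

-- ===== VERDICT (by name: the statement is the Claim_ definition above) =====
theorem sameNuly_spec : Claim_equal_sameNuly := by
  intro A _ _
  unfold Spec_sameNuly
  simp only [sameNuly, sameNuly_alt]
  set m := (PySem.List.pyGetD A 0 []).length with hm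
  -- A's side: count over range m of the all-zero-column predicate
  have hA : (PySem.List.pyRange 0 (m : Int) 1).foldl (fun pocNul p =>
      let bRiadok := (PySem.List.pyRange 0 (A.length : Int) 1).foldl (fun b i =>
        if PySem.List.pyGetD (PySem.List.pyGetD A i []) p 0 ≠ 0 then false else b) true
      if bRiadok = true then pocNul + 1 else pocNul) 0
      = (((PySem.List.pyRange 0 (m : Int) 1).countP
          (fun p => A.all (fun row => decide (PySem.List.pyGetD row p 0 = 0)))) : Int) := by
    have hfun : (fun (pocNul : Int) (p : Int) =>
        let bRiadok := (PySem.List.pyRange 0 (A.length : Int) 1).foldl (fun b i =>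
          if PySem.List.pyGetD (PySem.List.pyGetD A i []) p 0 ≠ 0 then false else b) true
        if bRiadok = true then pocNul + 1 else pocNul)
        = (fun (acc : Int) (p : Int) =>
          if (A.all (fun row => decide (PySem.List.pyGetD row p 0 = 0))) = true then acc + 1 else acc) := by
      funext acc p
      show (if ((PySem.List.pyRange 0 (A.length : Int) 1).foldl (fun b i =>
          if PySem.List.pyGetD (PySem.List.pyGetD A i []) p 0 ≠ 0 then false else b) true) = true
        then acc + 1 else acc) = _
      rw [show ((A.length : Nat) : Int) = PySem.List.len A by simp [PySem.List.len_eq]]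
      rw [PySem.List.foldl_pyRange_zero_pyGetD A ([] : List Int)
        (fun (b : Bool) row => if PySem.List.pyGetD row p 0 ≠ 0 then false else b) true,
        pv_flag_foldl]
      simp
    rw [hfun, PySem.List.foldl_count_if
      (fun p : Int => A.all (fun row => decide (PySem.List.pyGetD row p 0 = 0)))
      (PySem.List.pyRange 0 (m : Int) 1) 0, zero_add]
  rw [hA]
  -- B's side: the survivors of range m are exactly that predicate's filter
  have hnd : (PySem.List.pyRange 0 (m : Int) 1).Nodup := PySem.List.nodup_pyRange_one 0 (m : Int)
  have h0 : PySem.Set.ofList (PySem.List.pyRange 0 (m : Int) 1)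
      = (PySem.List.pyRange 0 (m : Int) 1).filter (fun _ => true) := by
    rw [PySem.Set.ofList_eq_self_of_nodup _ hnd, List.filter_true]
  rw [h0]
  rw [pv_survivors A (PySem.List.pyRange 0 (m : Int) 1) (fun _ => true) hnd]
  rw [List.countP_eq_length_filter]
  norm_cast
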